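-- pv_equiv track=rewrite | github.com/BrennoR/google-foundations-of-programming-python | 1_longest_word.py | find_longest_word_in_string
-- ===== SOURCE A (Python) =====
-- import collections
--
-- def find_longest_word_in_string(letters, words):
--     letter_positions = collections.defaultdict(list)
--     # For each letter in 'letters', collect all the indices at which it appears.
--     # O(#letters) space and speed.
--     for index, letter in enumerate(letters):
--         letter_positions[letter].append(index)
--     # For words, in descending order by length...
--     # Bails out early on first matched word, and within word on
--     # impossible letter/position combinations, but worst case is
--     # O(#words # avg-len) * O(#letters / 26) time; constant space.
--     # With some work, could be O(#W * avg-len) * log2(#letters/26)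
--     # But since binary search has more overhead
--     # than simple iteration, log2(#letters) is about as
--     # expensive as simple iterations as long as
--     # the length of the arrays for each letter is
--     # “small”.  If letters are randomly present in the
--     # search string, the log2 is about equal in speed to simple traversal
--     # up to lengths of a few hundred characters.
--     for word in sorted(words, key=lambda w: len(w), reverse=True):
--         pos = 0
--         found = True
--         for letter in word:
--             if letter not in letter_positions:
--                 found = False
--                 break
--             # Find any remaining valid positions in search string where this
--             # letter appears.  It would be better to do this with binary search,
--             # but this is very Python-ic.
--             possible_positions = [p for p in letter_positions[letter] if p >= pos]
--             if not possible_positions: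
--                 found = False
--                 break
--             pos = possible_positions[0] + 1
--
--         # We didn't break out of the loop, so all letters have valid positions
--         if found:
--             return word
-- ===== SOURCE B (Python) =====
-- def find_longest_word_in_string(letters, words):
--     # Two-pointer subsequence scan per word; no position index needed.
--     for word in sorted(words, key=len, reverse=True):
--         it = iter(letters)
--         if all(c in it for c in word):
--             return word
--     return None
-- ===== Notes on version B (the rewrite author's own statement) =====
-- stated objective: simpler
-- what changed: Replaces the per-letter position-index dict and the per-character filtered position-list scans with a direct two-pointer (iterator-consuming) subsequence test per word, keeping the stable descending-length sort.
import Mathlib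
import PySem

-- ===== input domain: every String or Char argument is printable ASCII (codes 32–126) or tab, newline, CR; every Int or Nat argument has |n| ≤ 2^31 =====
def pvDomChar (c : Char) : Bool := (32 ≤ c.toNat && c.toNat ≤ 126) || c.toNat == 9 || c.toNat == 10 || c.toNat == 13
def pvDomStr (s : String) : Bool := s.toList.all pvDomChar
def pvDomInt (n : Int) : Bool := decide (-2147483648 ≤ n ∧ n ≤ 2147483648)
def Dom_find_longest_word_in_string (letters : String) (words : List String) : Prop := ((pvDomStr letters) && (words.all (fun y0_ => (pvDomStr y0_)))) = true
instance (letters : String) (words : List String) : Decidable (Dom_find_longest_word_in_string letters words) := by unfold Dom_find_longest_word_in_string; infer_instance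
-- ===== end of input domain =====

-- B replaces the per-letter position-index dict and per-character filtered position scans
-- with a direct two-pointer subsequence test per word (same stable descending-length sort); objective: simpler.

-- ===== PORT A =====
-- inner 'for letter in word' loop of A: pos/found state, break = early none
def pvGoA (d : PySem.Dict Char (List Int)) : List Char → Int → Option Int
  | [], pos => some pos
  | c :: rest, pos =>
    if d.contains c then
      match (d.getD c []).filter (fun p => decide (pos ≤ p)) with
      | [] => none
      | p :: _ => pvGoA d rest (p + 1)
    else none

-- outer 'for word in sorted(...)' loop of A: return word on first found
def pvLoopA (d : PySem.Dict Char (List Int)) : List String → Option String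
  | [] => none
  | w :: ws => if (pvGoA d w.toList 0).isSome then some w else pvLoopA d ws

def find_longest_word_in_string (letters : String) (words : List String) : Option String :=
  let letter_positions :=
    (PySem.List.enumerate letters.toList 0).foldl
      (fun d p => d.modify p.2 [] (fun l => l ++ [p.1])) PySem.Dict.empty
  pvLoopA letter_positions (PySem.List.sorted words (fun w => PySem.Str.len w) true)

-- ===== PORT B =====
-- 'it = iter(letters); all(c in it for c in word)': greedy consumption of the remaining letters
def pvIsSub : List Char → List Char → Bool
  | [], _ => true
  | _ :: _, [] => false
  | c :: w, l :: ls => if l == c then pvIsSub w ls else pvIsSub (c :: w) ls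

def pvLoopB (letters : List Char) : List String → Option String
  | [] => none
  | w :: ws => if pvIsSub w.toList letters then some w else pvLoopB letters ws

def find_longest_word_in_string_alt (letters : String) (words : List String) : Option String :=
  pvLoopB letters.toList (PySem.List.sorted words (fun w => PySem.Str.len w) true)

-- ===== PRECONDITION & SPEC =====
def Spec_find_longest_word_in_string (letters : String) (words : List String) (out : Option String) : Prop := out = find_longest_word_in_string_alt letters words
instance (letters : String) (words : List String) (out : Option String) : Decidable (Spec_find_longest_word_in_string letters words out) := by unfold Spec_find_longest_word_in_string; infer_instance

-- ===== CLAIM (what is proved, stated in full; the proofs are below) =====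
def Claim_equal_find_longest_word_in_string : Prop := ∀ (letters : String) (words : List String), Dom_find_longest_word_in_string letters words → Spec_find_longest_word_in_string letters words (find_longest_word_in_string letters words)

-- ===== LEMMAS AND PROOFS =====

-- F c ls s = the (Int) indices, starting at s, where c occurs in ls
def pvF (c : Char) (ls : List Char) (s : Int) : List Int :=
  ((PySem.List.enumerate ls s).filter (fun p => p.2 == c)).map (·.1)

theorem pvF_nil (c : Char) (s : Int) : pvF c [] s = [] := rfl

theorem pvF_cons (c x : Char) (ls : List Char) (s : Int) :
    pvF c (x :: ls) s = (if x == c then [s] else []) ++ pvF c ls (s + 1) := by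
  simp only [pvF, PySem.List.enumerate_cons, List.filter_cons]
  by_cases h : x = c <;> simp [h]

theorem pvF_lb (c : Char) (ls : List Char) (s : Int) : ∀ q ∈ pvF c ls s, s ≤ q := by
  induction ls generalizing s with
  | nil => simp [pvF_nil]
  | cons x ls ih =>
    intro q hq
    rw [pvF_cons] at hq
    rcases List.mem_append.1 hq with h | h
    · by_cases hx : (x == c) = true <;> simp [hx] at h; omega
    · have := ih (s + 1) q h; omega

theorem pvF_filter_drop (c : Char) (ls : List Char) (s : Int) (k : Nat) :
    (pvF c ls s).filter (fun q => decide (s + (k : Int) ≤ q)) = pvF c (ls.drop k) (s + (k : Int)) := by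
  induction ls generalizing s k with
  | nil => simp [pvF_nil]
  | cons x ls ih =>
    cases k with
    | zero =>
      simp only [Nat.cast_zero, add_zero, List.drop_zero]
      exact List.filter_eq_self.2 (fun q hq => by simpa using pvF_lb c (x :: ls) s q hq)
    | succ k =>
      rw [pvF_cons, List.filter_append]
      have h2 : s + ((k + 1 : Nat) : Int) = (s + 1) + (k : Int) := by push_cast; ring
      simp only [List.drop_succ_cons, h2, ih]
      by_cases hx : (x == c) = true
      · have hd : (decide ((s + 1) + (k : Int) ≤ s)) = false := by simp; omega
        simp [hx, hd]
      · simp [hx]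

theorem pvF_head (c : Char) (ls : List Char) (s : Int) :
    (pvF c ls s).head? = (ls.findIdx? (fun x => x == c)).map (fun j => s + (j : Int)) := by
  induction ls generalizing s with
  | nil => simp [pvF_nil]
  | cons x ls ih =>
    rw [pvF_cons, List.findIdx?_cons]
    by_cases hx : (x == c) = true
    · simp [hx]
    · simp only [hx, Bool.false_eq_true, reduceIte, List.nil_append]
      rw [ih]
      cases ls.findIdx? (fun x => x == c) with
      | none => simp
      | some j => simp; ring

theorem pvIsSub_cons (c : Char) (w ls : List Char) :
    pvIsSub (c :: w) ls =
      match ls.findIdx? (fun x => x == c) with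
      | none => false
      | some j => pvIsSub w (ls.drop (j + 1)) := by
  induction ls with
  | nil => rfl
  | cons l ls ih =>
    rw [List.findIdx?_cons]
    by_cases hl : (l == c) = true
    · simp [pvIsSub, hl]
    · simp only [pvIsSub, hl, ih]
      cases ls.findIdx? (fun x => x == c) <;> simp

-- the dict built by A's first loop holds exactly the occurrence positions
theorem pvGetD_build (ls : List Char) (c : Char) :
    (((PySem.List.enumerate ls 0).foldl
        (fun d p => d.modify p.2 [] (fun l => l ++ [p.1])) PySem.Dict.empty).getD c []) = pvF c ls 0 := by
  have hmap : (PySem.List.enumerate ls 0).foldl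
      (fun d p => d.modify p.2 [] (fun l => l ++ [p.1])) PySem.Dict.empty
      = ((PySem.List.enumerate ls 0).map Prod.swap).foldl
      (fun d p => d.modify p.1 [] (fun l => l ++ [p.2])) PySem.Dict.empty := by
    rw [List.foldl_map]; rfl
  rw [hmap, PySem.Dict.getD_foldl_modify_append]
  simp [pvF, PySem.Dict.getD_empty, List.filter_map, Function.comp_def]

-- A's inner step, independent of the contains-check branch
theorem pvGoA_cons (d : PySem.Dict Char (List Int)) (c : Char) (w : List Char) (pos : Int) :
    pvGoA d (c :: w) pos =
      match (d.getD c []).filter (fun p => decide (pos ≤ p)) with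
      | [] => none
      | p :: _ => pvGoA d w (p + 1) := by
  by_cases h : d.contains c = true
  · simp [pvGoA, h]
  · have h0 : d.getD c [] = [] :=
      PySem.Dict.getD_of_not_contains d [] (by simpa using h)
    simp [pvGoA, h, h0]

-- main per-word lemma: A's dict-scan check = B's two-pointer check
theorem pvGoA_eq_isSub (ls0 : List Char) (w : List Char) (k : Nat) :
    (pvGoA ((PySem.List.enumerate ls0 0).foldl
        (fun d p => d.modify p.2 [] (fun l => l ++ [p.1])) PySem.Dict.empty)
      w (k : Int)).isSome = pvIsSub w (ls0.drop k) := by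
  induction w generalizing k with
  | nil => simp [pvGoA, pvIsSub]
  | cons c w ih =>
    rw [pvGoA_cons, pvGetD_build, pvIsSub_cons]
    have hf : (pvF c ls0 0).filter (fun p => decide ((k : Int) ≤ p))
        = pvF c (ls0.drop k) (k : Int) := by
      have := pvF_filter_drop c ls0 0 k
      simpa using this
    rw [hf]
    have hh := pvF_head c (ls0.drop k) (k : Int)
    cases hidx : (ls0.drop k).findIdx? (fun x => x == c) with
    | none =>
      rw [hidx] at hh
      simp at hh
      rw [hh]
      rfl
    | some j =>
      rw [hidx] at hh
      simp at hh
      obtain ⟨tail, htail⟩ : ∃ t, pvF c (ls0.drop k) (k : Int) = ((k : Int) + (j : Int)) :: t := by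
        cases hF : pvF c (ls0.drop k) (k : Int) with
        | nil => rw [hF] at hh; simp at hh
        | cons a t => rw [hF] at hh; simp at hh; exact ⟨t, by rw [hh]⟩
      rw [htail]
      have hcast : (k : Int) + (j : Int) + 1 = ((k + j + 1 : Nat) : Int) := by push_cast; ring_nf
      change (pvGoA _ w ((k : Int) + (j : Int) + 1)).isSome = pvIsSub w (List.drop (j + 1) (List.drop k ls0))
      rw [hcast, ih (k + j + 1), List.drop_drop]
      congr 1

-- ===== VERDICT (by name: the statement is the Claim_ definition above) =====
theorem find_longest_word_in_string_spec : Claim_equal_find_longest_word_in_string := by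
  intro letters words _
  unfold Spec_find_longest_word_in_string find_longest_word_in_string find_longest_word_in_string_alt
  induction PySem.List.sorted words (fun w => PySem.Str.len w) true with
  | nil => rfl
  | cons w ws ih =>
    simp only [pvLoopA, pvLoopB]
    have := pvGoA_eq_isSub letters.toList w.toList 0
    simp only [Nat.cast_zero, List.drop_zero] at this
    rw [this, ih]
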